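-- pv_equiv track=rewrite | github.com/vuer-ai/vuer | src/vuer/webrtc/__init__.py | _apply_sdp_framerate
-- ===== SOURCE A (Python) =====
-- def _apply_sdp_framerate(sdp, max_fps):
--     """Insert a=framerate:<fps> after each m=video line in the SDP."""
--     lines = sdp.split("\r\n")
--     result = []
--     for line in lines:
--         result.append(line)
--         if line.startswith("m=video"):
--             result.append(f"a=framerate:{max_fps}")
--     return "\r\n".join(result)
-- ===== SOURCE B (Python) =====
-- def _apply_sdp_framerate(sdp, max_fps):
--     """Insert a=framerate:<fps> after each m=video line by splitting the SDP at
--     the "\r\nm=video" match points (pattern search), not by iterating lines."""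
--     parts = ("\r\n" + sdp).split("\r\nm=video")
--     out = parts[0]
--     for p in parts[1:]:
--         head, sep, tail = p.partition("\r\n")
--         out += "\r\nm=video" + head + "\r\na=framerate:" + str(max_fps) + sep + tail
--     return out[2:]
-- ===== Notes on version B (the rewrite author's own statement) =====
-- stated objective: alternative
-- what changed: A splits the SDP into all its lines, loops over every line testing startswith and rejoins; B never iterates lines: it splits the string at the "\r\nm=video" match points, splices the framerate tag into each fragment after the fragment's first line (partition), and strips the sentinel "\r\n" it prepended.
import Mathlib
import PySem

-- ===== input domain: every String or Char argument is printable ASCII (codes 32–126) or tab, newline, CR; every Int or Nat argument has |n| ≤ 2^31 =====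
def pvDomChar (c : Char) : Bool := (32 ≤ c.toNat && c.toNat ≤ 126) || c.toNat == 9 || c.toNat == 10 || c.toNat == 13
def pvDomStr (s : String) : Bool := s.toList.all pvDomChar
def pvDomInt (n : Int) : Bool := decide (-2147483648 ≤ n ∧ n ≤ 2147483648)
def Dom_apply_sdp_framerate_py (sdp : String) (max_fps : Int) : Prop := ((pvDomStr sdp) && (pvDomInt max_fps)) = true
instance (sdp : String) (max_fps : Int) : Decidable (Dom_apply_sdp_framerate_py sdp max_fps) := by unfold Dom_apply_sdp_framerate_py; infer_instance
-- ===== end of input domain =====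

-- B replaces A's per-line loop (split on "\r\n", test every line, rejoin) by splitting the
-- SDP at the "\r\nm=video" match points and splicing the framerate tag into each fragment
-- via partition (objective: alternative).

-- ===== PORT A =====
-- lines = sdp.split("\r\n"); for line: result.append(line); if startswith: append tag; "\r\n".join(result)
def apply_sdp_framerate_py (sdp : String) (max_fps : Int) : String :=
  let lines := PySem.Chars.splitOn sdp.toList "\r\n".toList
  let result := lines.foldl (fun res line =>
    (res ++ [line]) ++
      (if PySem.Chars.startswith line "m=video".toList then
        ["a=framerate:".toList ++ PySem.Int.toChars max_fps] else [])) []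
  String.ofList (PySem.Chars.join "\r\n".toList result)

-- ===== PORT B =====
-- p.partition("\r\n"): (before first "\r\n", the separator if found else "", the rest)
def pvPartition3 : List Char → List Char × List Char × List Char
  | [] => ([], [], [])
  | c :: t =>
    if "\r\n".toList.isPrefixOf (c :: t) then ([], "\r\n".toList, (c :: t).drop 2)
    else
      let q := pvPartition3 t
      (c :: q.1, q.2.1, q.2.2)

-- parts = ("\r\n"+sdp).split("\r\nm=video"); out = parts[0];
-- for p in parts[1:]: head,sep,tail = p.partition("\r\n");
--   out += "\r\nm=video" + head + "\r\na=framerate:" + str(max_fps) + sep + tail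
-- return out[2:]
def apply_sdp_framerate_py_alt (sdp : String) (max_fps : Int) : String :=
  let parts := PySem.Chars.splitOn ("\r\n".toList ++ sdp.toList) "\r\nm=video".toList
  match parts with
  | [] => ""   -- unreachable: str.split never returns an empty list
  | p0 :: ps =>
    let out := ps.foldl (fun out p =>
      let q := pvPartition3 p
      out ++ "\r\nm=video".toList ++ q.1 ++ "\r\na=framerate:".toList ++
        PySem.Int.toChars max_fps ++ q.2.1 ++ q.2.2) p0
    String.ofList (PySem.List.slice out (some 2) none)   -- out[2:]

-- ===== PRECONDITION & SPEC =====
def Spec_apply_sdp_framerate_py (sdp : String) (max_fps : Int) (out : String) : Prop := out = apply_sdp_framerate_py_alt sdp max_fps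
instance (sdp : String) (max_fps : Int) (out : String) : Decidable (Spec_apply_sdp_framerate_py sdp max_fps out) := by unfold Spec_apply_sdp_framerate_py; infer_instance

-- ===== CLAIM (what is proved, stated in full; the proofs are below) =====
def Claim_equal_apply_sdp_framerate_py : Prop := ∀ (sdp : String) (max_fps : Int), Dom_apply_sdp_framerate_py sdp max_fps → Spec_apply_sdp_framerate_py sdp max_fps (apply_sdp_framerate_py sdp max_fps)

-- ===== LEMMAS AND PROOFS =====

-- proof-side reference: cut a string at its first "\r\n"
def pvCutCRLF : List Char → List Char × Option (List Char)
  | [] => ([], none)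
  | c :: t =>
    if "\r\n".toList.isPrefixOf (c :: t) then ([], some ((c :: t).drop 2))
    else
      let p := pvCutCRLF t
      (c :: p.1, p.2)

theorem pvCutCRLF_some_lt : ∀ (s r : List Char), (pvCutCRLF s).2 = some r → r.length < s.length := by
  intro s
  induction s with
  | nil => intro r h; simp [pvCutCRLF] at h
  | cons c t ih =>
    intro r h
    by_cases hp : "\r\n".toList.isPrefixOf (c :: t) = true
    · simp only [pvCutCRLF, hp, if_true] at h
      cases h
      simp only [List.drop_succ_cons, List.length_drop, List.length_cons]
      omega
    · simp only [pvCutCRLF, hp] at h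
      have := ih r h
      simp only [List.length_cons]
      omega

-- proof-side reference: the lines of s (A's split) — and the uniform target of BOTH proofs:
-- emit each line, the tag after each m=video line, "\r\n" between lines
def pvLines (s : List Char) : List (List Char) :=
  (pvCutCRLF s).1 ::
    (match h : (pvCutCRLF s).2 with
     | none => []
     | some r => pvLines r)
termination_by s.length
decreasing_by exact pvCutCRLF_some_lt s r h

def pvAltGo (tag : List Char) (s : List Char) : List Char :=
  (pvCutCRLF s).1 ++
    (if PySem.Chars.startswith (pvCutCRLF s).1 "m=video".toList then tag else []) ++
    (match h : (pvCutCRLF s).2 with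
     | none => []
     | some r => '\r' :: '\n' :: pvAltGo tag r)
termination_by s.length
decreasing_by exact pvCutCRLF_some_lt s r h

-- proof-side reference: cut a string at its first "\r\nm=video"
def pvCutD : List Char → List Char × Option (List Char)
  | [] => ([], none)
  | c :: t =>
    if "\r\nm=video".toList.isPrefixOf (c :: t) then ([], some ((c :: t).drop 9))
    else
      let p := pvCutD t
      (c :: p.1, p.2)

theorem pvCutD_some_lt : ∀ (s r : List Char), (pvCutD s).2 = some r → r.length < s.length := by
  intro s
  induction s with
  | nil => intro r h; simp [pvCutD] at h
  | cons c t ih =>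
    intro r h
    by_cases hp : "\r\nm=video".toList.isPrefixOf (c :: t) = true
    · simp only [pvCutD, hp, if_true] at h
      cases h
      simp only [List.drop_succ_cons, List.length_drop, List.length_cons]
      omega
    · simp only [pvCutD, hp] at h
      have := ih r h
      simp only [List.length_cons]
      omega

-- the parts of t separated by "\r\nm=video" (B's split)
def pvPartsD (s : List Char) : List (List Char) :=
  (pvCutD s).1 ::
    (match h : (pvCutD s).2 with
     | none => []
     | some r => pvPartsD r)
termination_by s.length
decreasing_by exact pvCutD_some_lt s r h

-- clean unfolding equations
theorem pvCut_cons_pos (c : Char) (rest : List Char)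
    (hp : ("\r\n".toList).isPrefixOf (c :: rest) = true) :
    pvCutCRLF (c :: rest) = ([], some ((c :: rest).drop 2)) := by
  simp only [pvCutCRLF]
  rw [if_pos hp]

theorem pvCut_cons_neg (c : Char) (rest : List Char)
    (hp : ¬ ("\r\n".toList).isPrefixOf (c :: rest) = true) :
    pvCutCRLF (c :: rest) = (c :: (pvCutCRLF rest).1, (pvCutCRLF rest).2) := by
  simp only [pvCutCRLF]
  rw [if_neg hp]

theorem pvCutD_cons_pos (c : Char) (rest : List Char)
    (hp : ("\r\nm=video".toList).isPrefixOf (c :: rest) = true) :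
    pvCutD (c :: rest) = ([], some ((c :: rest).drop 9)) := by
  simp only [pvCutD]
  rw [if_pos hp]

theorem pvCutD_cons_neg (c : Char) (rest : List Char)
    (hp : ¬ ("\r\nm=video".toList).isPrefixOf (c :: rest) = true) :
    pvCutD (c :: rest) = (c :: (pvCutD rest).1, (pvCutD rest).2) := by
  simp only [pvCutD]
  rw [if_neg hp]

theorem pvLines_none (s : List Char) (h : (pvCutCRLF s).2 = none) :
    pvLines s = [(pvCutCRLF s).1] := by
  rw [pvLines]
  split
  · rfl
  · simp_all

theorem pvLines_some (s r : List Char) (h : (pvCutCRLF s).2 = some r) :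
    pvLines s = (pvCutCRLF s).1 :: pvLines r := by
  rw [pvLines]
  split
  · simp_all
  · simp_all

theorem pvPartsD_none (s : List Char) (h : (pvCutD s).2 = none) :
    pvPartsD s = [(pvCutD s).1] := by
  rw [pvPartsD]
  split
  · rfl
  · simp_all

theorem pvPartsD_some (s r : List Char) (h : (pvCutD s).2 = some r) :
    pvPartsD s = (pvCutD s).1 :: pvPartsD r := by
  rw [pvPartsD]
  split
  · simp_all
  · simp_all

theorem pvAltGo_none (tag s : List Char) (h : (pvCutCRLF s).2 = none) :
    pvAltGo tag s = (pvCutCRLF s).1 ++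
      (if PySem.Chars.startswith (pvCutCRLF s).1 "m=video".toList then tag else []) := by
  rw [pvAltGo]
  split
  all_goals split <;> simp_all

theorem pvAltGo_some (tag s r : List Char) (h : (pvCutCRLF s).2 = some r) :
    pvAltGo tag s = (pvCutCRLF s).1 ++
      (if PySem.Chars.startswith (pvCutCRLF s).1 "m=video".toList then tag else []) ++
      '\r' :: '\n' :: pvAltGo tag r := by
  rw [pvAltGo]
  split
  all_goals split <;> simp_all

-- A's split produces pvLines
theorem pvGo_eq (fuel : Nat) : ∀ (l cur : List Char) (accL : List (List Char)),
    l.length < fuel →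
    PySem.Chars.splitOn.go "\r\n".toList fuel l cur accL =
      accL.reverse ++ (pvLines l).modifyHead (cur.reverse ++ ·) := by
  induction fuel with
  | zero => intro l cur accL h; omega
  | succ fuel ih =>
    intro l cur accL h
    cases l with
    | nil =>
      rw [PySem.Chars.splitOn.go]
      · rw [pvLines_none [] rfl]
        simp [pvCutCRLF]
      · omega
    | cons c rest =>
      rw [PySem.Chars.splitOn.go]
      by_cases hp : ("\r\n".toList).isPrefixOf (c :: rest) = true
      · rw [if_pos hp]
        have hlen : ((c :: rest).drop ("\r\n".toList).length).length < fuel := by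
          have h2 : ("\r\n".toList).length = 2 := rfl
          rw [h2]
          simp only [List.length_drop, List.length_cons]
          simp only [List.length_cons] at h
          omega
        rw [ih _ _ _ hlen]
        have hcut := pvCut_cons_pos c rest hp
        rw [pvLines_some (c :: rest) ((c :: rest).drop 2) (by rw [hcut])]
        rw [hcut]
        have hdd : ((c :: rest).drop ("\r\n".toList).length) = (c :: rest).drop 2 := rfl
        rw [hdd]
        cases hpl : pvLines ((c :: rest).drop 2) <;> simp
      · rw [if_neg hp]
        have hlen : rest.length < fuel := by
          simp only [List.length_cons] at h; omega
        rw [ih _ _ _ hlen]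
        have hcut := pvCut_cons_neg c rest hp
        cases hm : (pvCutCRLF rest).2 with
        | none =>
          rw [pvLines_none rest hm, pvLines_none (c :: rest) (by rw [hcut]; exact hm)]
          rw [hcut]
          simp
        | some r =>
          rw [pvLines_some rest r hm, pvLines_some (c :: rest) r (by rw [hcut]; exact hm)]
          rw [hcut]
          simp

theorem pvSplitOn_eq (l : List Char) : PySem.Chars.splitOn l "\r\n".toList = pvLines l := by
  rw [PySem.Chars.splitOn.eq_def]
  rw [pvGo_eq (l.length + 1) l [] [] (by omega)]
  cases hpl : pvLines l <;> simp

-- B's split produces pvPartsD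
theorem pvGoD_eq (fuel : Nat) : ∀ (l cur : List Char) (accL : List (List Char)),
    l.length < fuel →
    PySem.Chars.splitOn.go "\r\nm=video".toList fuel l cur accL =
      accL.reverse ++ (pvPartsD l).modifyHead (cur.reverse ++ ·) := by
  induction fuel with
  | zero => intro l cur accL h; omega
  | succ fuel ih =>
    intro l cur accL h
    cases l with
    | nil =>
      rw [PySem.Chars.splitOn.go]
      · rw [pvPartsD_none [] rfl]
        simp [pvCutD]
      · omega
    | cons c rest =>
      rw [PySem.Chars.splitOn.go]
      by_cases hp : ("\r\nm=video".toList).isPrefixOf (c :: rest) = true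
      · rw [if_pos hp]
        have hlen : ((c :: rest).drop ("\r\nm=video".toList).length).length < fuel := by
          have h2 : ("\r\nm=video".toList).length = 9 := rfl
          rw [h2]
          simp only [List.length_drop, List.length_cons]
          simp only [List.length_cons] at h
          omega
        rw [ih _ _ _ hlen]
        have hcut := pvCutD_cons_pos c rest hp
        rw [pvPartsD_some (c :: rest) ((c :: rest).drop 9) (by rw [hcut])]
        rw [hcut]
        have hdd : ((c :: rest).drop ("\r\nm=video".toList).length) = (c :: rest).drop 9 := rfl
        rw [hdd]
        cases hpl : pvPartsD ((c :: rest).drop 9) <;> simp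
      · rw [if_neg hp]
        have hlen : rest.length < fuel := by
          simp only [List.length_cons] at h; omega
        rw [ih _ _ _ hlen]
        have hcut := pvCutD_cons_neg c rest hp
        cases hm : (pvCutD rest).2 with
        | none =>
          rw [pvPartsD_none rest hm, pvPartsD_none (c :: rest) (by rw [hcut]; exact hm)]
          rw [hcut]
          simp
        | some r =>
          rw [pvPartsD_some rest r hm, pvPartsD_some (c :: rest) r (by rw [hcut]; exact hm)]
          rw [hcut]
          simp

theorem pvSplitOnD_eq (l : List Char) : PySem.Chars.splitOn l "\r\nm=video".toList = pvPartsD l := by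
  rw [PySem.Chars.splitOn.eq_def]
  rw [pvGoD_eq (l.length + 1) l [] [] (by omega)]
  cases hpl : pvPartsD l <;> simp

-- ===== A = pvAltGo =====
def pvG (mf : Int) (line : List Char) : List (List Char) :=
  line :: (if PySem.Chars.startswith line "m=video".toList then
    ["a=framerate:".toList ++ PySem.Int.toChars mf] else [])

theorem pvMainNone (mf : Int) (s : List Char) (hm : (pvCutCRLF s).2 = none) :
    PySem.Chars.join "\r\n".toList ((pvLines s).flatMap (pvG mf)) =
      pvAltGo ("\r\na=framerate:".toList ++ PySem.Int.toChars mf) s := by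
  rw [pvLines_none s hm, pvAltGo_none _ s hm]
  simp only [List.flatMap_cons, List.flatMap_nil, List.append_nil, pvG]
  by_cases hv : PySem.Chars.startswith (pvCutCRLF s).1 "m=video".toList = true
  · rw [if_pos hv, if_pos hv]
    rw [PySem.Chars.join_cons_cons, PySem.Chars.join_singleton]
    have htag : ("\r\na=framerate:".toList : List Char) = '\r' :: '\n' :: "a=framerate:".toList := rfl
    have hsep : ("\r\n".toList : List Char) = ['\r', '\n'] := rfl
    rw [htag, hsep]
    simp [List.append_assoc]
  · rw [if_neg hv, if_neg hv]
    rw [PySem.Chars.join_singleton]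
    simp

theorem pvMain (mf : Int) : ∀ (n : Nat) (s : List Char), s.length ≤ n →
    PySem.Chars.join "\r\n".toList ((pvLines s).flatMap (pvG mf)) =
      pvAltGo ("\r\na=framerate:".toList ++ PySem.Int.toChars mf) s := by
  intro n
  induction n with
  | zero =>
    intro s hs
    have hnil : s = [] := List.length_eq_zero_iff.mp (Nat.le_zero.mp hs)
    subst hnil
    exact pvMainNone mf [] rfl
  | succ n ih =>
    intro s hs
    cases hm : (pvCutCRLF s).2 with
    | none => exact pvMainNone mf s hm
    | some r =>
      have hr : r.length ≤ n := by
        have := pvCutCRLF_some_lt s r hm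
        omega
      rw [pvLines_some s r hm, pvAltGo_some _ s r hm]
      have hne : (pvLines r).flatMap (pvG mf) ≠ [] := by
        cases hm' : (pvCutCRLF r).2 with
        | none => rw [pvLines_none r hm']; simp [pvG]
        | some r' => rw [pvLines_some r r' hm']; simp [pvG]
      obtain ⟨x, xs, hxx⟩ := List.exists_cons_of_ne_nil hne
      have hIH := ih r hr
      rw [hxx] at hIH
      by_cases hv : PySem.Chars.startswith (pvCutCRLF s).1 "m=video".toList = true
      · simp only [List.flatMap_cons, pvG, hxx]
        rw [if_pos hv, if_pos hv]
        simp only [List.cons_append, List.nil_append]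
        rw [PySem.Chars.join_cons_cons, PySem.Chars.join_cons_cons, hIH]
        have htag : ("\r\na=framerate:".toList : List Char) = '\r' :: '\n' :: "a=framerate:".toList := rfl
        have hsep : ("\r\n".toList : List Char) = ['\r', '\n'] := rfl
        rw [htag, hsep]
        simp [List.append_assoc]
      · simp only [List.flatMap_cons, pvG, hxx]
        rw [if_neg hv, if_neg hv]
        simp only [List.cons_append, List.nil_append]
        rw [PySem.Chars.join_cons_cons, hIH]
        have hsep : ("\r\n".toList : List Char) = ['\r', '\n'] := rfl
        rw [hsep]
        simp [List.append_assoc]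

-- ===== B = pvAltGo =====

-- one delimiter fragment of B's loop body
def pvStep (tag p : List Char) : List Char :=
  "\r\nm=video".toList ++ (pvPartition3 p).1 ++ tag ++ (pvPartition3 p).2.1 ++ (pvPartition3 p).2.2

def pvBRest (tag r : List Char) : List Char := (pvPartsD r).flatMap (pvStep tag)

def pvBCore (tag t : List Char) : List Char :=
  (pvCutD t).1 ++ (match (pvCutD t).2 with | none => [] | some r => pvBRest tag r)

theorem pvBRest_unfold (tag r : List Char) :
    pvBRest tag r = pvStep tag (pvCutD r).1 ++
      (match (pvCutD r).2 with | none => [] | some r' => pvBRest tag r') := by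
  cases h : (pvCutD r).2 with
  | none => rw [pvBRest, pvPartsD_none r h]; simp [pvBRest]
  | some r' => rw [pvBRest, pvPartsD_some r r' h]; simp [pvBRest]

-- "\r\nm=video" starts at '\r''\n' iff "m=video" starts the rest
theorem pvDl_prefix (s : List Char) :
    ("\r\nm=video".toList).isPrefixOf ('\r' :: '\n' :: s) = ("m=video".toList).isPrefixOf s := by
  simp [List.isPrefixOf]

theorem pvDl_imp_crlf (l : List Char) (h : ("\r\nm=video".toList).isPrefixOf l = true) :
    ("\r\n".toList).isPrefixOf l = true := by
  rw [List.isPrefixOf_iff_prefix] at h ⊢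
  exact List.IsPrefix.trans ⟨"m=video".toList, rfl⟩ h

-- crlf-prefix shape
theorem pvCrlf_prefix_shape (c : Char) (t : List Char)
    (h : ("\r\n".toList).isPrefixOf (c :: t) = true) :
    c = '\r' ∧ ∃ t', t = '\n' :: t' := by
  have hsep : ("\r\n".toList : List Char) = ['\r', '\n'] := rfl
  rw [hsep] at h
  cases t with
  | nil => simp [List.isPrefixOf] at h
  | cons c2 t' =>
    simp [List.isPrefixOf] at h
    exact ⟨h.1.symm, t', by rw [← h.2]⟩

-- pvCutD through a string with no "\r\n": where pvCutCRLF finds none, pvCutD finds none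
theorem pvCutD_of_none : ∀ (s : List Char), (pvCutCRLF s).2 = none → pvCutD s = (s, none) := by
  intro s
  induction s with
  | nil => intro _; simp [pvCutD]
  | cons c t ih =>
    intro h
    by_cases hp : ("\r\n".toList).isPrefixOf (c :: t) = true
    · rw [pvCut_cons_pos c t hp] at h; simp at h
    · rw [pvCut_cons_neg c t hp] at h
      have hD : ¬ ("\r\nm=video".toList).isPrefixOf (c :: t) = true := fun hc => hp (pvDl_imp_crlf _ hc)
      rw [pvCutD_cons_neg c t hD, ih h]

-- pvCutD passes through the first line and continues at its "\r\n"
theorem pvCutD_of_some : ∀ (s r : List Char), (pvCutCRLF s).2 = some r →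
    pvCutD s = ((pvCutCRLF s).1 ++ (pvCutD ('\r' :: '\n' :: r)).1, (pvCutD ('\r' :: '\n' :: r)).2) := by
  intro s
  induction s with
  | nil => intro r h; simp [pvCutCRLF] at h
  | cons c t ih =>
    intro r h
    by_cases hp : ("\r\n".toList).isPrefixOf (c :: t) = true
    · obtain ⟨hc, t', ht⟩ := pvCrlf_prefix_shape c t hp
      subst hc; subst ht
      rw [pvCut_cons_pos _ _ hp] at h ⊢
      simp at h ⊢
      subst h
      rfl
    · rw [pvCut_cons_neg c t hp] at h ⊢
      have hD : ¬ ("\r\nm=video".toList).isPrefixOf (c :: t) = true := fun hc => hp (pvDl_imp_crlf _ hc)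
      rw [pvCutD_cons_neg c t hD, ih r h]
      simp

-- two non-matching steps of pvCutD over a "\r\n" whose next line does not start with m=video
theorem pvCutD_crlf_cons (s : List Char) (hm : ¬ ("m=video".toList).isPrefixOf s = true) :
    pvCutD ('\r' :: '\n' :: s) = ('\r' :: '\n' :: (pvCutD s).1, (pvCutD s).2) := by
  rw [pvCutD_cons_neg '\r' ('\n' :: s) (by rw [pvDl_prefix]; exact hm)]
  rw [pvCutD_cons_neg '\n' s (by simp [List.isPrefixOf])]

-- one matching step of pvCutD at a "\r\nm=video"
theorem pvCutD_crlf_mv (s : List Char) (hm : ("m=video".toList).isPrefixOf s = true) :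
    pvCutD ('\r' :: '\n' :: s) = ([], some (s.drop 7)) := by
  rw [pvCutD_cons_pos '\r' ('\n' :: s) (by rw [pvDl_prefix]; exact hm)]
  rfl

-- a pattern without '\r' starts s iff it starts s's first line
theorem pvPrefix_cut : ∀ (s pat : List Char), '\r' ∉ pat →
    pat.isPrefixOf s = pat.isPrefixOf (pvCutCRLF s).1 := by
  intro s
  induction s with
  | nil => intro pat _; simp [pvCutCRLF]
  | cons c t ih =>
    intro pat hpat
    by_cases hp : ("\r\n".toList).isPrefixOf (c :: t) = true
    · obtain ⟨hc, t', ht⟩ := pvCrlf_prefix_shape c t hp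
      subst hc; subst ht
      rw [pvCut_cons_pos _ _ hp]
      cases pat with
      | nil => simp [List.isPrefixOf]
      | cons p pr =>
        simp only [List.mem_cons, not_or] at hpat
        have hne : (p == '\r') = false := by
          simp only [beq_eq_false_iff_ne, ne_eq]
          intro h; exact hpat.1 h.symm
        simp [List.isPrefixOf, hne]
    · rw [pvCut_cons_neg c t hp]
      cases pat with
      | nil => simp [List.isPrefixOf]
      | cons p pr =>
        simp only [List.isPrefixOf]
        have : pr.isPrefixOf t = pr.isPrefixOf (pvCutCRLF t).1 := by
          apply ih
          intro hc
          exact hpat (List.mem_cons_of_mem _ hc)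
        rw [this]

-- cut the first line off "m=video" ++ r
theorem pvCut_mv_append (r : List Char) :
    pvCutCRLF ("m=video".toList ++ r) = ("m=video".toList ++ (pvCutCRLF r).1, (pvCutCRLF r).2) := by
  simp [pvCutCRLF, List.isPrefixOf]

-- the first line of t is the head of t when non-empty
theorem pvCut1_head (t : List Char) (c0 : Char) (p : List Char)
    (h : (pvCutCRLF t).1 = c0 :: p) : ∃ t', t = c0 :: t' := by
  cases t with
  | nil => simp [pvCutCRLF] at h
  | cons c t' =>
    by_cases hp : ("\r\n".toList).isPrefixOf (c :: t') = true
    · rw [pvCut_cons_pos c t' hp] at h; simp at h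
    · rw [pvCut_cons_neg c t' hp] at h
      simp at h
      exact ⟨t', by rw [h.1]⟩

-- a string with no "\r\n" is its own first line
theorem pvCut1_of_none : ∀ (s : List Char), (pvCutCRLF s).2 = none → (pvCutCRLF s).1 = s := by
  intro s
  induction s with
  | nil => intro _; simp [pvCutCRLF]
  | cons c t ih =>
    intro h
    by_cases hp : ("\r\n".toList).isPrefixOf (c :: t) = true
    · rw [pvCut_cons_pos c t hp] at h; simp at h
    · rw [pvCut_cons_neg c t hp] at h ⊢
      rw [ih h]

theorem pvPart3_cons_neg (c : Char) (t : List Char)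
    (hp : ¬ ("\r\n".toList).isPrefixOf (c :: t) = true) :
    pvPartition3 (c :: t) = (c :: (pvPartition3 t).1, (pvPartition3 t).2.1, (pvPartition3 t).2.2) := by
  simp only [pvPartition3]
  rw [if_neg hp]

-- partition of (first line ++ q) where q is empty or starts with "\r\n"
theorem pvPart_eq : ∀ (r q : List Char), (q = [] ∨ ∃ w, q = '\r' :: '\n' :: w) →
    pvPartition3 ((pvCutCRLF r).1 ++ q) = ((pvCutCRLF r).1, q.take 2, q.drop 2) := by
  intro r
  induction r with
  | nil =>
    intro q hq
    simp only [pvCutCRLF, List.nil_append]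
    rcases hq with rfl | ⟨w, rfl⟩
    · rfl
    · simp [pvPartition3, List.isPrefixOf]
  | cons c t ih =>
    intro q hq
    by_cases hp : ("\r\n".toList).isPrefixOf (c :: t) = true
    · rw [pvCut_cons_pos c t hp]
      simp only [List.nil_append]
      rcases hq with rfl | ⟨w, rfl⟩
      · rfl
      · simp [pvPartition3, List.isPrefixOf]
    · rw [pvCut_cons_neg c t hp]
      have hnp : ¬ ("\r\n".toList).isPrefixOf (c :: ((pvCutCRLF t).1 ++ q)) = true := by
        intro hcon
        obtain ⟨hc, x, hx⟩ := pvCrlf_prefix_shape _ _ hcon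
        subst hc
        cases hcl : (pvCutCRLF t).1 with
        | nil =>
          rw [hcl] at hx
          simp only [List.nil_append] at hx
          rcases hq with rfl | ⟨w, rfl⟩
          · simp at hx
          · simp at hx
        | cons c2 p =>
          obtain ⟨t', rfl⟩ := pvCut1_head t c2 p hcl
          rw [hcl] at hx
          simp at hx
          apply hp
          rw [hx.1]
          simp [List.isPrefixOf]
      rw [List.cons_append, pvPart3_cons_neg _ _ hnp, ih q hq]

-- B's core scan produces "\r\n" ++ pvAltGo
theorem pvBMain (tag : List Char) : ∀ (n : Nat) (s : List Char), s.length ≤ n →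
    pvBCore tag ('\r' :: '\n' :: s) = '\r' :: '\n' :: pvAltGo tag s := by
  intro n
  induction n with
  | zero =>
    intro s hs
    have hnil : s = [] := List.length_eq_zero_iff.mp (Nat.le_zero.mp hs)
    subst hnil
    rw [pvBCore, pvCutD_crlf_cons [] (by simp [List.isPrefixOf]), pvCutD_of_none [] rfl]
    rw [pvAltGo_none tag [] rfl]
    simp [pvCutCRLF, PySem.Chars.startswith]
  | succ n ih =>
    intro s hs
    by_cases hm : ("m=video".toList).isPrefixOf s = true
    · -- the first line of s starts with m=video: the split consumed "\r\nm=video"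
      obtain ⟨r, rfl⟩ := List.isPrefixOf_iff_prefix.mp hm
      have hdrop7 : ("m=video".toList ++ r).drop 7 = r := by simp
      rw [pvBCore, pvCutD_crlf_mv _ hm, hdrop7]
      simp only [List.nil_append]
      have hsw : PySem.Chars.startswith (pvCutCRLF ("m=video".toList ++ r)).1 "m=video".toList = true := by
        rw [pvCut_mv_append]
        simp only [PySem.Chars.startswith]
        exact List.isPrefixOf_iff_prefix.mpr ⟨(pvCutCRLF r).1, rfl⟩
      cases hc2 : (pvCutCRLF r).2 with
      | none =>
        have hc1 : (pvCutCRLF r).1 = r := pvCut1_of_none r hc2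
        rw [pvBRest_unfold, pvCutD_of_none r hc2]
        simp only
        rw [pvAltGo_none tag _ (by rw [pvCut_mv_append]; exact hc2)]
        rw [if_pos hsw, pvCut_mv_append]
        rw [pvStep]
        have hpart : pvPartition3 r = (r, [], []) := by
          have := pvPart_eq r [] (Or.inl rfl)
          rw [hc1] at this
          simpa using this
        rw [hpart, hc1]
        simp
      | some r2 =>
        have hlen : r2.length ≤ n := by
          have h1 := pvCutCRLF_some_lt r r2 hc2
          have h7 : ("m=video".toList).length = 7 := rfl
          simp only [List.length_append, h7] at hs
          omega
        rw [pvBRest_unfold, pvCutD_of_some r r2 hc2]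
        by_cases hm2 : ("m=video".toList).isPrefixOf r2 = true
        · rw [pvCutD_crlf_mv r2 hm2]
          simp only
          rw [pvStep, pvPart_eq r [] (Or.inl rfl)]
          simp only [List.take_nil, List.drop_nil]
          have hIH := ih r2 hlen
          rw [pvBCore, pvCutD_crlf_mv r2 hm2] at hIH
          simp only [List.nil_append] at hIH
          rw [pvAltGo_some tag _ r2 (by rw [pvCut_mv_append]; exact hc2)]
          rw [if_pos hsw, pvCut_mv_append]
          rw [hIH]
          simp
        · rw [pvCutD_crlf_cons r2 hm2]
          simp only
          have hpart := pvPart_eq r ('\r' :: '\n' :: (pvCutD r2).1) (Or.inr ⟨_, rfl⟩)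
          rw [pvStep, hpart]
          have hIH := ih r2 hlen
          rw [pvBCore, pvCutD_crlf_cons r2 hm2] at hIH
          simp only at hIH
          have hIH' : (pvCutD r2).1 ++ (match (pvCutD r2).2 with | none => [] | some r' => pvBRest tag r') = pvAltGo tag r2 := by
            have := hIH
            simp only [List.cons_append] at this
            exact (List.cons_inj_right _).mp ((List.cons_inj_right _).mp this)
          rw [pvAltGo_some tag _ r2 (by rw [pvCut_mv_append]; exact hc2)]
          rw [if_pos hsw, pvCut_mv_append]
          rw [← hIH']
          simp
    · -- first line does not start with m=video
      have hswf : PySem.Chars.startswith (pvCutCRLF s).1 "m=video".toList = false := by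
        simp only [PySem.Chars.startswith]
        rw [← pvPrefix_cut s "m=video".toList (by decide)]
        exact Bool.eq_false_iff.mpr hm
      cases hc2 : (pvCutCRLF s).2 with
      | none =>
        have hc1 : (pvCutCRLF s).1 = s := pvCut1_of_none s hc2
        rw [pvBCore, pvCutD_crlf_cons s hm, pvCutD_of_none s hc2]
        simp only
        rw [pvAltGo_none tag s hc2, hswf]
        rw [hc1]
        simp
      | some r =>
        have hlen : r.length ≤ n := by
          have := pvCutCRLF_some_lt s r hc2
          omega
        rw [pvBCore, pvCutD_crlf_cons s hm, pvCutD_of_some s r hc2]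
        simp only
        have hIH := ih r hlen
        rw [pvBCore] at hIH
        rw [pvAltGo_some tag s r hc2, hswf]
        simp only [Bool.false_eq_true, if_false]
        cases hz : (pvCutD ('\r' :: '\n' :: r)).2 with
        | none =>
          rw [hz] at hIH
          simp only at hIH
          simp only [List.append_nil]
          rw [← hIH]
          simp
        | some r' =>
          rw [hz] at hIH
          simp only at hIH
          simp only [List.cons_append, List.append_assoc]
          rw [← hIH]
          simp

-- A's output is pvAltGo
theorem pvA_eq (sdp : String) (mf : Int) :
    apply_sdp_framerate_py sdp mf =
      String.ofList (pvAltGo ("\r\na=framerate:".toList ++ PySem.Int.toChars mf) sdp.toList) := by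
  unfold apply_sdp_framerate_py
  have hfold : ∀ (lines : List (List Char)),
      lines.foldl (fun res line =>
        (res ++ [line]) ++
          (if PySem.Chars.startswith line "m=video".toList then
            ["a=framerate:".toList ++ PySem.Int.toChars mf] else [])) [] =
      lines.flatMap (pvG mf) := by
    intro lines
    have : (fun (res : List (List Char)) line =>
        (res ++ [line]) ++
          (if PySem.Chars.startswith line "m=video".toList then
            ["a=framerate:".toList ++ PySem.Int.toChars mf] else [])) =
        (fun res line => res ++ pvG mf line) := by
      funext res line
      simp [pvG, List.append_assoc]
    rw [this, PySem.List.foldl_append_eq_flatMap]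
    simp
  simp only [pvSplitOn_eq, hfold]
  rw [pvMain mf sdp.toList.length sdp.toList le_rfl]

-- B's output is pvAltGo
theorem pvB_eq (sdp : String) (mf : Int) :
    apply_sdp_framerate_py_alt sdp mf =
      String.ofList (pvAltGo ("\r\na=framerate:".toList ++ PySem.Int.toChars mf) sdp.toList) := by
  unfold apply_sdp_framerate_py_alt
  have ht : ("\r\n".toList ++ sdp.toList) = '\r' :: '\n' :: sdp.toList := rfl
  simp only [pvSplitOnD_eq, ht]
  have hM := pvBMain ("\r\na=framerate:".toList ++ PySem.Int.toChars mf) sdp.toList.length sdp.toList le_rfl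
  rw [pvBCore] at hM
  have hsl : ∀ (x : List Char), PySem.List.slice ('\r' :: '\n' :: x) (some 2) none = x := by
    intro x
    rw [PySem.List.slice_from _ (by norm_num)]
    simp
  cases hz : (pvCutD ('\r' :: '\n' :: sdp.toList)).2 with
  | none =>
    rw [pvPartsD_none _ hz]
    rw [hz] at hM
    simp only [List.append_nil] at hM
    simp only [List.foldl_nil]
    rw [hM, hsl]
  | some r =>
    rw [pvPartsD_some _ r hz]
    rw [hz] at hM
    simp only
    have hf : (fun (out p : List Char) => out ++ "\r\nm=video".toList ++ (pvPartition3 p).1 ++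
        "\r\na=framerate:".toList ++ PySem.Int.toChars mf ++ (pvPartition3 p).2.1 ++ (pvPartition3 p).2.2) =
        (fun out p => out ++ pvStep ("\r\na=framerate:".toList ++ PySem.Int.toChars mf) p) := by
      funext out p
      simp [pvStep, List.append_assoc]
    rw [hf, PySem.List.foldl_append_eq_flatMap]
    have hbr : (pvPartsD r).flatMap (pvStep ("\r\na=framerate:".toList ++ PySem.Int.toChars mf)) =
        pvBRest ("\r\na=framerate:".toList ++ PySem.Int.toChars mf) r := rfl
    rw [hbr, hM, hsl]

-- ===== VERDICT (by name: the statement is the Claim_ definition above) =====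
theorem apply_sdp_framerate_py_spec : Claim_equal_apply_sdp_framerate_py := by
  intro sdp mf _
  unfold Spec_apply_sdp_framerate_py
  rw [pvA_eq, pvB_eq]
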